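-- pv_equiv track=rewrite | github.com/bjarkemoensted/adventofcode | aoc/aoc_2024/solution23.py | count_candidate_cliques
-- ===== SOURCE A (Python) =====
-- from itertools import combinations
--
-- def count_candidate_cliques(cliques: list, size=3, must_start_with="t"):
--     """Takes a list of cliques (sets of fully interconnected nodes) in a graph.
--     Returns the number of distinct cliques with the specified size, starting with the specified string."""
--
--     candidates = set()
--     for clique in cliques:
--         if len(clique) < size:
--             continue  # Ignore cliques smaller than the target size
--
--         # Otherwise, get all cliques and sub-cliques
--         for comb in combinations(clique, size):
--             if any(u.startswith(must_start_with) for u in comb):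
--                 cand = tuple(sorted(comb))
--                 candidates.add(cand)
--             #
--         #
--
--     res = len(candidates)
--     return res
-- ===== SOURCE B (Python) =====
-- from itertools import combinations
--
--
-- def count_candidate_cliques(cliques: list, size=3, must_start_with="t"):
--     """Complement counting: collect the set of ALL sorted size-k sub-cliques and the
--     set of those with no prefixed node; the answer is the difference of the sizes."""
--     allc = set()
--     bad = set()
--     for clique in cliques:
--         if len(clique) >= size:
--             allc.update(combinations(sorted(clique), size))
--             rest = sorted(u for u in clique if not u.startswith(must_start_with))
--             bad.update(combinations(rest, size))
--     return len(allc) - len(bad)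
-- ===== Notes on version B (the rewrite author's own statement) =====
-- stated objective: alternative
-- what changed: Instead of filtering each size-k combination with any(startswith) and collecting the survivors, B collects two sets per clique - all sorted size-k combinations and the size-k combinations of the non-prefixed nodes only - and returns the difference of the two set sizes (complement counting).
import Mathlib
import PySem

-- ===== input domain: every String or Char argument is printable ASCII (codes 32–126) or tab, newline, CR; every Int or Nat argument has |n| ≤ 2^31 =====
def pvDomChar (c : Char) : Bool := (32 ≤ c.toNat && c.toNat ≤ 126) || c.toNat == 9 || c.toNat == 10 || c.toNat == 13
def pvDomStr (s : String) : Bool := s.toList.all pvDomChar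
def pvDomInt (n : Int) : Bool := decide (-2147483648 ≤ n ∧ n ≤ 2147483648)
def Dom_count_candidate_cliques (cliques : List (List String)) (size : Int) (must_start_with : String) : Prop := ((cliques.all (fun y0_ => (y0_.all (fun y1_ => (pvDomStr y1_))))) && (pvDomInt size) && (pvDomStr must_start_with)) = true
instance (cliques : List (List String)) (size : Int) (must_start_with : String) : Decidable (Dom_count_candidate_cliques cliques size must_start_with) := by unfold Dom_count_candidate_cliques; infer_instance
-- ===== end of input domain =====

-- B counts by complement: per clique it collects ALL sorted size-k sub-cliques and
-- those made only of non-prefixed nodes into two sets, and returns the difference of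
-- the set sizes instead of filtering each combination (objective: alternative; no speed claim).


-- ===== PORT A =====
def count_candidate_cliques (cliques : List (List String)) (size : Int) (must_start_with : String) : Int :=
  let candidates : PySem.Set (List String) :=
    cliques.foldl (fun cands clique =>
      if (clique.length : Int) < size then cands
      else
        (PySem.List.combinations clique size.toNat).foldl (fun cands comb =>
          if comb.any (fun u => PySem.Str.startswith u must_start_with) then
            PySem.Set.add cands (PySem.List.sorted comb (fun x => x) false)
          else cands) cands)
      PySem.Set.empty
  (candidates.length : Int)

-- ===== PORT B =====
def count_candidate_cliques_alt (cliques : List (List String)) (size : Int) (must_start_with : String) : Int :=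
  let sets : PySem.Set (List String) × PySem.Set (List String) :=
    cliques.foldl (fun s clique =>
      if size ≤ (clique.length : Int) then
        let rest := PySem.List.sorted (clique.filter (fun u => !PySem.Str.startswith u must_start_with)) (fun x => x) false
        (PySem.Set.update s.1 (PySem.List.combinations (PySem.List.sorted clique (fun x => x) false) size.toNat),
         PySem.Set.update s.2 (PySem.List.combinations rest size.toNat))
      else s)
      (PySem.Set.empty, PySem.Set.empty)
  (sets.1.length : Int) - (sets.2.length : Int)

-- ===== PRECONDITION & SPEC =====
-- Pre_ excludes exactly the inputs where A raises: a negative size with a nonempty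
-- cliques list makes combinations(clique, size) raise ValueError (B raises there too).
def Pre_count_candidate_cliques (cliques : List (List String)) (size : Int) (must_start_with : String) : Prop :=
  0 ≤ size ∨ cliques = []
instance (cliques : List (List String)) (size : Int) (must_start_with : String) : Decidable (Pre_count_candidate_cliques cliques size must_start_with) := by unfold Pre_count_candidate_cliques; infer_instance
def pvWitness_count_candidate_cliques : List (List String) × Int × String := ([["ta", "b", "c"], ["ta", "b", "x", "y"]], 3, "t")

def Spec_count_candidate_cliques (cliques : List (List String)) (size : Int) (must_start_with : String) (out : Int) : Prop := out = count_candidate_cliques_alt cliques size must_start_with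
instance (cliques : List (List String)) (size : Int) (must_start_with : String) (out : Int) : Decidable (Spec_count_candidate_cliques cliques size must_start_with out) := by unfold Spec_count_candidate_cliques; infer_instance

-- ===== CLAIM (what is proved, stated in full; the proofs are below) =====
def Claim_equal_count_candidate_cliques : Prop := ∀ (cliques : List (List String)) (size : Int) (must_start_with : String), Dom_count_candidate_cliques cliques size must_start_with → Pre_count_candidate_cliques cliques size must_start_with → Spec_count_candidate_cliques cliques size must_start_with (count_candidate_cliques cliques size must_start_with)

-- ===== LEMMAS AND PROOFS =====

-- whether a candidate tuple contains a prefixed node (a property of the tuple itself)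
def pGood (msw : String) (y : List String) : Bool := y.any (fun u => PySem.Str.startswith u msw)

-- the per-clique candidate list of A
def genA (size : Int) (msw : String) (clique : List String) : List (List String) :=
  if (clique.length : Int) < size then []
  else
    ((PySem.List.combinations clique size.toNat).filter
        (fun comb => comb.any (fun u => PySem.Str.startswith u msw))).map
      (fun comb => PySem.List.sorted comb (fun x => x) false)

-- the per-clique contributions of B's two sets
def genAll (size : Int) (clique : List String) : List (List String) :=
  if size ≤ (clique.length : Int) then
    PySem.List.combinations (PySem.List.sorted clique (fun x => x) false) size.toNat
  else []

def genBad (size : Int) (msw : String) (clique : List String) : List (List String) :=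
  if size ≤ (clique.length : Int) then
    PySem.List.combinations
      (PySem.List.sorted (clique.filter (fun u => !PySem.Str.startswith u msw)) (fun x => x) false)
      size.toNat
  else []

theorem foldl_if_add_eq_update {α β : Type} [BEq α] (l : List β) (s : PySem.Set α)
    (p : β → Bool) (g : β → α) :
    l.foldl (fun s c => if p c then PySem.Set.add s (g c) else s) s
      = PySem.Set.update s ((l.filter p).map g) := by
  induction l generalizing s with
  | nil => simp [PySem.Set.update_nil]
  | cons x xs ih =>
      by_cases h : p x = true
      · simp [h, ih, PySem.Set.update_cons]
      · simp [h, ih]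

theorem foldA (size : Int) (msw : String) :
    ∀ (cliques : List (List String)) (s : PySem.Set (List String)),
      cliques.foldl (fun cands clique =>
        if (clique.length : Int) < size then cands
        else
          (PySem.List.combinations clique size.toNat).foldl (fun cands comb =>
            if comb.any (fun u => PySem.Str.startswith u msw) then
              PySem.Set.add cands (PySem.List.sorted comb (fun x => x) false)
            else cands) cands) s
      = PySem.Set.update s (cliques.flatMap (genA size msw))
  | [], s => by simp [PySem.Set.update_nil]
  | c :: cs, s => by
      rw [List.foldl_cons, foldA size msw cs, List.flatMap_cons, PySem.Set.update_append]
      congr 1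
      by_cases h : (c.length : Int) < size
      · simp [h, genA, PySem.Set.update_nil]
      · rw [if_neg h, foldl_if_add_eq_update]
        simp [genA, h]

theorem foldB (size : Int) (msw : String) :
    ∀ (cliques : List (List String)) (s : PySem.Set (List String) × PySem.Set (List String)),
      cliques.foldl (fun s clique =>
        if size ≤ (clique.length : Int) then
          let rest := PySem.List.sorted (clique.filter (fun u => !PySem.Str.startswith u msw)) (fun x => x) false
          (PySem.Set.update s.1 (PySem.List.combinations (PySem.List.sorted clique (fun x => x) false) size.toNat),
           PySem.Set.update s.2 (PySem.List.combinations rest size.toNat))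
        else s) s
      = (PySem.Set.update s.1 (cliques.flatMap (genAll size)),
         PySem.Set.update s.2 (cliques.flatMap (genBad size msw)))
  | [], s => by simp [PySem.Set.update_nil]
  | c :: cs, s => by
      rw [List.foldl_cons, foldB size msw cs, List.flatMap_cons, List.flatMap_cons,
        PySem.Set.update_append, PySem.Set.update_append]
      by_cases h : size ≤ (c.length : Int)
      · simp only [if_pos h, genAll, genBad]
      · simp [h, genAll, genBad, PySem.Set.update_nil]

theorem portA_eq (cliques : List (List String)) (size : Int) (msw : String) :
    count_candidate_cliques cliques size msw
      = ((PySem.Set.ofList (cliques.flatMap (genA size msw))).length : Int) := by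
  simp only [count_candidate_cliques]
  rw [foldA size msw cliques PySem.Set.empty]
  rw [show PySem.Set.empty = ([] : List (List String)) from rfl, PySem.Set.update_nil_left]

theorem portB_eq (cliques : List (List String)) (size : Int) (msw : String) :
    count_candidate_cliques_alt cliques size msw
      = ((PySem.Set.ofList (cliques.flatMap (genAll size))).length : Int)
        - ((PySem.Set.ofList (cliques.flatMap (genBad size msw))).length : Int) := by
  simp only [count_candidate_cliques_alt]
  rw [foldB size msw cliques (PySem.Set.empty, PySem.Set.empty)]
  rw [show PySem.Set.empty = ([] : List (List String)) from rfl, PySem.Set.update_nil_left,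
    PySem.Set.update_nil_left]

-- membership in combinations of the sorted list = sorted images of sublists of the list
theorem comb_sorted_iff (c : List String) (k : Nat) (y : List String) :
    y ∈ PySem.List.combinations (PySem.List.sorted c (fun x => x) false) k ↔
      ∃ comb, comb.Sublist c ∧ comb.length = k ∧ y = PySem.List.sorted comb (fun x => x) false := by
  rw [PySem.List.mem_combinations_iff]
  have hperm : (PySem.List.sorted c (fun x => x) false).Perm c :=
    PySem.List.sorted_perm c (fun x => x) false
  have hpw : (PySem.List.sorted c (fun x => x) false).Pairwise (fun a b => a ≤ b) :=
    PySem.List.sorted_pairwise c (fun x => x)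
  constructor
  · rintro ⟨hsub, hlen⟩
    obtain ⟨l, hl, hls⟩ := hsub.subperm.trans hperm.subperm
    refine ⟨l, hls, by rw [hl.length_eq, hlen], ?_⟩
    have hyp : y.Pairwise (fun a b => a ≤ b) := hpw.sublist hsub
    rw [PySem.List.sorted_eq_sorted_of_perm l y (fun x => x) Function.injective_id hl,
      PySem.List.sorted_eq_self_of_pairwise y (fun x => x) hyp]
  · rintro ⟨comb, hsub, hlen, rfl⟩
    obtain ⟨l, hl, hls⟩ := hsub.subperm.trans hperm.symm.subperm
    have hlp : l.Pairwise (fun a b => a ≤ b) := hpw.sublist hls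
    have hy : PySem.List.sorted comb (fun x => x) false = l := by
      have hp2 : (PySem.List.sorted comb (fun x => x) false).Perm l :=
        (PySem.List.sorted_perm comb (fun x => x) false).trans hl.symm
      exact hp2.eq_of_pairwise (fun a b _ _ hab hba => le_antisymm hab hba)
        (PySem.List.sorted_pairwise comb (fun x => x)) hlp
    exact ⟨hy ▸ hls, by rw [PySem.List.length_sorted, hlen]⟩

-- A's per-clique candidates are exactly the all-set elements containing a prefixed node
theorem mem_genA_iff (size : Int) (msw : String) (c : List String) (y : List String) :
    y ∈ genA size msw c ↔ y ∈ genAll size c ∧ pGood msw y = true := by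
  by_cases h : size ≤ (c.length : Int)
  · rw [genA, if_neg (by omega), genAll, if_pos h, comb_sorted_iff]
    simp only [List.mem_map, List.mem_filter, PySem.List.mem_combinations_iff]
    constructor
    · rintro ⟨comb, ⟨⟨hsub, hlen⟩, hany⟩, rfl⟩
      refine ⟨⟨comb, hsub, hlen, rfl⟩, ?_⟩
      rw [pGood, (PySem.List.sorted_perm comb (fun x => x) false).any_eq, hany]
    · rintro ⟨⟨comb, hsub, hlen, rfl⟩, hgood⟩
      refine ⟨comb, ⟨⟨hsub, hlen⟩, ?_⟩, rfl⟩
      rw [pGood, (PySem.List.sorted_perm comb (fun x => x) false).any_eq] at hgood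
      exact hgood
  · rw [genA, if_pos (by omega), genAll, if_neg h]
    simp
-- B's per-clique bad candidates are exactly the all-set elements with no prefixed node
theorem mem_genBad_iff (size : Int) (msw : String) (c : List String) (y : List String) :
    y ∈ genBad size msw c ↔ y ∈ genAll size c ∧ pGood msw y = false := by
  by_cases h : size ≤ (c.length : Int)
  · rw [genBad, if_pos h, genAll, if_pos h, comb_sorted_iff, comb_sorted_iff]
    constructor
    · rintro ⟨comb, hsub, hlen, rfl⟩
      have hsubc : comb.Sublist c :=
        hsub.trans List.filter_sublist
      have hnone : ∀ x ∈ comb, PySem.Str.startswith x msw = false := by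
        intro x hx
        have := (List.mem_filter.mp (hsub.mem hx)).2
        simpa using this
      refine ⟨⟨comb, hsubc, hlen, rfl⟩, ?_⟩
      rw [pGood, (PySem.List.sorted_perm comb (fun x => x) false).any_eq]
      simp only [List.any_eq_false]
      intro x hx; simpa using hnone x hx
    · rintro ⟨⟨comb, hsub, hlen, rfl⟩, hbad⟩
      rw [pGood, (PySem.List.sorted_perm comb (fun x => x) false).any_eq] at hbad
      simp only [List.any_eq_false] at hbad
      have hsubf : comb.Sublist (c.filter (fun u => !PySem.Str.startswith u msw)) := by
        have := hsub.filter (fun u => !PySem.Str.startswith u msw)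
        rwa [List.filter_eq_self.mpr (by intro x hx; simpa using hbad x hx)] at this
      exact ⟨comb, hsubf, hlen, rfl⟩
  · rw [genBad, if_neg h, genAll, if_neg h]
    simp

theorem length_eq_of_nodup_mem_iff {α : Type} (xs ys : List α)
    (hx : xs.Nodup) (hy : ys.Nodup) (h : ∀ x, x ∈ xs ↔ x ∈ ys) :
    xs.length = ys.length :=
  ((List.perm_ext_iff_of_nodup hx hy).mpr h).length_eq

-- ===== VERDICT (by name: the statement is the Claim_ definition above) =====
theorem count_candidate_cliques_spec : Claim_equal_count_candidate_cliques := by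
  intro cliques size msw _hdom _hpre
  unfold Spec_count_candidate_cliques
  rw [portA_eq, portB_eq]
  set S : List (List String) := PySem.Set.ofList (cliques.flatMap (genAll size)) with hS
  have hmemAll : ∀ y, y ∈ S ↔ ∃ c ∈ cliques, y ∈ genAll size c := by
    intro y; rw [hS, PySem.Set.mem_ofList, List.mem_flatMap]
  -- A's candidate set is the good part of S
  have hgoodlen : (PySem.Set.ofList (cliques.flatMap (genA size msw))).length
      = (S.filter (pGood msw)).length := by
    apply length_eq_of_nodup_mem_iff _ _ (PySem.Set.nodup_ofList _)
      ((PySem.Set.nodup_ofList _).filter _)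
    intro y
    rw [PySem.Set.mem_ofList, List.mem_flatMap, List.mem_filter, hmemAll]
    constructor
    · rintro ⟨c, hc, hy⟩
      obtain ⟨h1, h2⟩ := (mem_genA_iff size msw c y).mp hy
      exact ⟨⟨c, hc, h1⟩, h2⟩
    · rintro ⟨⟨c, hc, h1⟩, h2⟩
      exact ⟨c, hc, (mem_genA_iff size msw c y).mpr ⟨h1, h2⟩⟩
  -- B's bad set is the non-good part of S
  have hbadlen : (PySem.Set.ofList (cliques.flatMap (genBad size msw))).length
      = (S.filter (fun y => !pGood msw y)).length := by
    apply length_eq_of_nodup_mem_iff _ _ (PySem.Set.nodup_ofList _)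
      ((PySem.Set.nodup_ofList _).filter _)
    intro y
    rw [PySem.Set.mem_ofList, List.mem_flatMap, List.mem_filter, hmemAll]
    constructor
    · rintro ⟨c, hc, hy⟩
      obtain ⟨h1, h2⟩ := (mem_genBad_iff size msw c y).mp hy
      exact ⟨⟨c, hc, h1⟩, by simp [h2]⟩
    · rintro ⟨⟨c, hc, h1⟩, h2⟩
      exact ⟨c, hc, (mem_genBad_iff size msw c y).mpr ⟨h1, by simpa using h2⟩⟩
  have hsplit : (S.filter (pGood msw)).length + (S.filter (fun y => !pGood msw y)).length
      = S.length := by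
    have := (List.filter_append_perm (pGood msw) S).length_eq
    simpa using this
  rw [hgoodlen, hbadlen]
  omega
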